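-- pv_equiv track=rewrite | github.com/Siva-Karthi/ProblemSolvingPractice | algorithms/searching/linear_search.py | repeated_k_times
-- ===== SOURCE A (Python) =====
-- def find_min(arr):
--     min_ = arr[0]
--     for i in arr:
--         if i < min_:
--             min_ = i
--     return min_
--
-- def repeated_k_times(arr, k):
--     elm_count = {}
--     elmnts_matching_k_times = []
--
--     for i in arr:
--         try:
--             elm_count[i] = elm_count[i] + 1
--         except KeyError:
--             elm_count[i] = 1
--     for key_, val_ in elm_count.items():
--         if val_ == k:
--             elmnts_matching_k_times.append(key_)
--     return find_min(elmnts_matching_k_times)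
-- ===== SOURCE B (Python) =====
-- def repeated_k_times(arr, k):
--     s = sorted(arr)
--     matches = []
--     i = 0
--     n = len(s)
--     while i < n:
--         j = i + 1
--         while j < n and s[j] == s[i]:
--             j += 1
--         if j - i == k:
--             matches.append(s[i])
--         i = j
--     return matches[0]
-- ===== Notes on version B (the rewrite author's own statement) =====
-- stated objective: alternative
-- what changed: Replaced A's dict-counting pass plus filter-and-scan minimum with a single run-length scan over sorted(arr): each maximal run of equal values whose length is k contributes its value, and since the scan is in ascending order the answer is the first match.
import Mathlib
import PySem

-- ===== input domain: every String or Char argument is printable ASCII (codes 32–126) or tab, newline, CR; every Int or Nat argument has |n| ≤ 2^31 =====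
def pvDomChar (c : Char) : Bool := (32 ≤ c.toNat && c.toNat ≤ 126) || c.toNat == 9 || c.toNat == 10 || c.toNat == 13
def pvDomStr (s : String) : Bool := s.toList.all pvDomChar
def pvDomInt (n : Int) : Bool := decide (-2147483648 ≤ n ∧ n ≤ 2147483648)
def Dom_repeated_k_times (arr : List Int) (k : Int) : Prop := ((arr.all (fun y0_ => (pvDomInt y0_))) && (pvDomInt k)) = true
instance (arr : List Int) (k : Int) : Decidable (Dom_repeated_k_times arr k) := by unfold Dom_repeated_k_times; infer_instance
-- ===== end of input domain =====

-- B replaces A's dict-counting pass with a single run-length scan over sorted(arr) (arr is not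
-- mutated); same return value, including the minimum tie-breaking, on every input where A returns.

-- ===== PORT A =====
-- find_min: min_ = arr[0]; for i in arr: if i < min_: min_ = i
-- ([] case is Python's IndexError on arr[0]; excluded by Pre_, value there irrelevant)
def pvFindMin (l : List Int) : Int :=
  match l with
  | [] => 0
  | h :: _ => l.foldl (fun m i => if i < m then i else m) h

def repeated_k_times (arr : List Int) (k : Int) : Int :=
  let elm_count := arr.foldl (fun d i =>
      match d.get? i with            -- try: d[i]+1 / except KeyError: 1
      | some v => d.insert i (v + 1)
      | none => d.insert i 1) (PySem.Dict.empty : PySem.Dict Int Int)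
  let matches_ := elm_count.items.foldl (fun acc p => if p.2 == k then acc ++ [p.1] else acc) ([] : List Int)
  pvFindMin matches_

-- ===== PORT B =====
-- the two nested while loops of Source B: the inner while computes one maximal run (takeWhile),
-- the outer loop resumes after it (dropWhile); appends the run's value when its length is k
def pvScanRuns (k : Int) : List Int → List Int
  | [] => []
  | x :: rest =>
      (if ((1 + (rest.takeWhile (fun y => y == x)).length : Nat) : Int) = k then [x] else []) ++
        pvScanRuns k (rest.dropWhile (fun y => y == x))
  termination_by s => s.length
  decreasing_by exact Nat.lt_succ_of_le (List.length_dropWhile_le _ _)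

def repeated_k_times_alt (arr : List Int) (k : Int) : Int :=
  match pvScanRuns k (PySem.List.sorted arr (fun x => x) false) with
  | [] => 0      -- matches[0] raises IndexError in Python; excluded by Pre_
  | h :: _ => h

-- ===== PRECONDITION & SPEC =====
-- Pre_ excludes exactly the inputs where both programs raise IndexError: no element of arr
-- occurs exactly k times (including arr = []).
def Pre_repeated_k_times (arr : List Int) (k : Int) : Prop :=
  ∃ x ∈ arr, (arr.count x : Int) = k
instance (arr : List Int) (k : Int) : Decidable (Pre_repeated_k_times arr k) := by
  unfold Pre_repeated_k_times; infer_instance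

def pvWitness_repeated_k_times : List Int × Int := ([3, 1, 2, 2], 1)

def Spec_repeated_k_times (arr : List Int) (k : Int) (out : Int) : Prop := out = repeated_k_times_alt arr k
instance (arr : List Int) (k : Int) (out : Int) : Decidable (Spec_repeated_k_times arr k out) := by unfold Spec_repeated_k_times; infer_instance

-- ===== CLAIM (what is proved, stated in full; the proofs are below) =====
def Claim_equal_repeated_k_times : Prop := ∀ (arr : List Int) (k : Int), Dom_repeated_k_times arr k → Pre_repeated_k_times arr k → Spec_repeated_k_times arr k (repeated_k_times arr k)

-- ===== LEMMAS AND PROOFS =====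

theorem pvFoldlMin_le (l : List Int) (a : Int) : l.foldl min a ≤ a ∧ ∀ b ∈ l, l.foldl min a ≤ b := by
  induction l generalizing a with
  | nil => simp
  | cons x t ih =>
    simp only [List.foldl_cons, List.mem_cons]
    refine ⟨le_trans (ih (min a x)).1 (min_le_left _ _), ?_⟩
    rintro b (rfl | hb)
    · exact le_trans (ih _).1 (min_le_right _ _)
    · exact (ih _).2 b hb

theorem pvFoldlMin_mem (l : List Int) (a : Int) : l.foldl min a = a ∨ l.foldl min a ∈ l := by
  induction l generalizing a with
  | nil => simp
  | cons x t ih =>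
    simp only [List.foldl_cons, List.mem_cons]
    rcases ih (min a x) with h | h
    · rcases min_cases a x with ⟨h2, _⟩ | ⟨h2, _⟩
      · rw [h2] at h ⊢; exact Or.inl h
      · rw [h2] at h ⊢; exact Or.inr (Or.inl h)
    · exact Or.inr (Or.inr h)

-- A's running-minimum update is Int's min
theorem pvFindMin_eq_foldl_min (h : Int) (t : List Int) :
    pvFindMin (h :: t) = (h :: t).foldl min h := by
  have : (fun (m i : Int) => if i < m then i else m) = fun m i => min m i := by
    funext m i
    rcases lt_or_ge i m with hlt | hge
    · rw [if_pos hlt, min_eq_right (le_of_lt hlt)]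
    · rw [if_neg (not_lt.mpr hge), min_eq_left hge]
  simp [pvFindMin, this]

-- A's matches list is the first-occurrence dedup of arr filtered by count = k
theorem pvMatchesA (arr : List Int) (k : Int) :
    ((arr.foldl (fun d i =>
      match d.get? i with
      | some v => d.insert i (v + 1)
      | none => d.insert i 1) (PySem.Dict.empty : PySem.Dict Int Int)).items.foldl
        (fun acc p => if p.2 == k then acc ++ [p.1] else acc) ([] : List Int))
    = ((PySem.List.dedup arr).filter (fun x => (arr.count x : Int) == k)) := by
  have hf : (fun (d : PySem.Dict Int Int) (i : Int) =>
      match d.get? i with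
      | some v => d.insert i (v + 1)
      | none => d.insert i 1) = fun d x => d.insert x (d.getD x 0 + 1) := by
    funext d i
    cases h : d.get? i <;> simp [PySem.Dict.getD_eq_get?_getD, h]
  rw [hf, PySem.Dict.foldl_insert_getD_add_one_eq_counter,
    PySem.List.foldl_append_if (fun p : Int × Int => p.2 == k) (fun p => p.1),
    PySem.Dict.items_counter]
  simp only [List.nil_append, List.filter_map, List.map_map]
  simp [Function.comp_def, PySem.List.dedup_eq_ofList]

theorem pvScanRuns_sublist (k : Int) (s : List Int) : (pvScanRuns k s).Sublist s := by
  induction s using pvScanRuns.induct with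
  | case1 => simp [pvScanRuns]
  | case2 x rest ih =>
    rw [pvScanRuns]
    have h2 : (pvScanRuns k (rest.dropWhile (fun y => y == x))).Sublist rest :=
      ih.trans (List.dropWhile_sublist _)
    split
    · exact List.Sublist.cons₂ _ h2
    · simp only [List.nil_append]
      exact h2.trans (List.sublist_cons_self _ _)

-- in a sorted list, the value of a run does not reappear after the run
theorem pvNotMemDrop (x : Int) (rest : List Int)
    (hle : ∀ y ∈ rest, x ≤ y) (hp : rest.Pairwise (· ≤ ·)) :
    x ∉ rest.dropWhile (fun y => y == x) := by
  intro hx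
  cases hd : rest.dropWhile (fun y => y == x) with
  | nil => rw [hd] at hx; simp at hx
  | cons y t =>
    rw [hd] at hx
    have hyx : y ≠ x := by
      have := List.head?_dropWhile_not (fun y => y == x) rest
      rw [hd] at this; simpa using this
    have hsub : (y :: t).Sublist rest := hd ▸ List.dropWhile_sublist _
    have hxy : x ≤ y := hle y (hsub.mem (by simp))
    have hpy : (y :: t).Pairwise (· ≤ ·) := hp.sublist hsub
    rcases List.mem_cons.mp hx with rfl | hxt
    · exact hyx rfl
    · exact hyx (le_antisymm ((List.pairwise_cons.mp hpy).1 x hxt) hxy)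

-- B's matches list holds exactly the values occurring k times
theorem pvScanRuns_mem (k : Int) (s : List Int) (hs : s.Pairwise (· ≤ ·)) (z : Int) :
    z ∈ pvScanRuns k s ↔ z ∈ s ∧ (s.count z : Int) = k := by
  induction s using pvScanRuns.induct with
  | case1 => simp [pvScanRuns]
  | case2 x rest ih =>
    rw [pvScanRuns]
    have hle : ∀ y ∈ rest, x ≤ y := (List.pairwise_cons.mp hs).1
    have hpr : rest.Pairwise (· ≤ ·) := (List.pairwise_cons.mp hs).2
    set run := rest.takeWhile (fun y => y == x) with hrun
    set rest' := rest.dropWhile (fun y => y == x) with hrest'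
    have hsplit : run ++ rest' = rest := List.takeWhile_append_dropWhile
    have hrunx : ∀ y ∈ run, y = x := by
      intro y hy
      have := List.mem_takeWhile_imp hy
      simpa using this
    have hxnot : x ∉ rest' := pvNotMemDrop x rest hle hpr
    have hpr' : rest'.Pairwise (· ≤ ·) := hpr.sublist (List.dropWhile_sublist _)
    have ihz := ih hpr'
    have hcount : ∀ w : Int, (x :: rest).count w =
        (if w = x then 1 else 0) + run.count w + rest'.count w := by
      intro w
      rw [List.count_cons, ← hsplit, List.count_append]
      by_cases hwx : w = x <;> simp [hwx] <;> omega
    have hrun_count_x : run.count x = run.length := by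
      rw [List.count_eq_length]
      intro y hy; exact (hrunx y hy) ▸ rfl
    have hrun_count_ne : ∀ w : Int, w ≠ x → run.count w = 0 := by
      intro w hw
      rw [List.count_eq_zero]
      intro hwmem; exact hw (hrunx w hwmem)
    constructor
    · intro hz
      rcases List.mem_append.mp hz with hz1 | hz2
      · simp at hz1
        obtain ⟨hc, hzx⟩ := hz1
        subst hzx
        refine ⟨by simp, ?_⟩
        rw [hcount z]
        have h0 : rest'.count z = 0 := List.count_eq_zero.mpr hxnot
        simp [hrun_count_x, h0] at *
        omega
      · have ⟨hzm, hzc⟩ := ihz.mp hz2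
        have hzx : z ≠ x := fun h => hxnot (h ▸ hzm)
        refine ⟨List.mem_cons_of_mem _ ((hsplit ▸ List.mem_append_right run hzm)), ?_⟩
        rw [hcount z, hrun_count_ne z hzx]
        simp [hzx]
        omega
    · rintro ⟨hzm, hzc⟩
      by_cases hzx : z = x
      · subst hzx
        apply List.mem_append_left
        have h0 : rest'.count z = 0 := List.count_eq_zero.mpr hxnot
        rw [hcount z, hrun_count_x, h0] at hzc
        simp at hzc
        have : ((1 + run.length : Nat) : Int) = k := by push_cast; omega
        simp [this]
      · apply List.mem_append_right
        apply ihz.mpr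
        have hzrest : z ∈ rest := by
          rcases List.mem_cons.mp hzm with h | h
          · exact absurd h hzx
          · exact h
        have hzrest' : z ∈ rest' := by
          rcases List.mem_append.mp (hsplit ▸ hzrest) with h | h
          · exact absurd (hrunx z h) hzx
          · exact h
        refine ⟨hzrest', ?_⟩
        rw [hcount z, hrun_count_ne z hzx] at hzc
        simp [hzx] at hzc
        omega

-- membership characterisation of A's matches list
theorem pvMatchesA_mem (arr : List Int) (k : Int) (z : Int) :
    z ∈ (PySem.List.dedup arr).filter (fun x => (arr.count x : Int) == k) ↔
      z ∈ arr ∧ (arr.count z : Int) = k := by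
  simp [List.mem_filter]

-- membership characterisation of B's matches list, pulled back to arr
theorem pvMatchesB_mem (arr : List Int) (k : Int) (z : Int) :
    z ∈ pvScanRuns k (PySem.List.sorted arr (fun x => x) false) ↔
      z ∈ arr ∧ (arr.count z : Int) = k := by
  have hperm := PySem.List.sorted_perm arr (fun x => x) false
  rw [pvScanRuns_mem k _ (PySem.List.sorted_pairwise arr (fun x => x)) z,
    hperm.count_eq, List.Perm.mem_iff hperm]

theorem repeated_k_times_spec_aux (arr : List Int) (k : Int)
    (hpre : Pre_repeated_k_times arr k) :
    repeated_k_times arr k = repeated_k_times_alt arr k := by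
  obtain ⟨x0, hx0m, hx0c⟩ := hpre
  -- A's side
  have hLmem := pvMatchesA_mem arr k
  rw [repeated_k_times]
  rw [pvMatchesA arr k]
  set L := (PySem.List.dedup arr).filter (fun x => (arr.count x : Int) == k) with hL
  have hx0L : x0 ∈ L := (hLmem x0).mpr ⟨hx0m, hx0c⟩
  obtain ⟨h, t, hcons⟩ : ∃ h t, L = h :: t := by
    cases hLc : L with
    | nil => rw [hLc] at hx0L; simp at hx0L
    | cons a b => exact ⟨a, b, rfl⟩
  rw [hcons, pvFindMin_eq_foldl_min]
  set rA := (h :: t).foldl min h with hrA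
  have hrA_mem : rA ∈ L := by
    rcases pvFoldlMin_mem (h :: t) h with he | hm
    · rw [hcons, hrA, he]; simp
    · rw [hcons, hrA]; exact hm
  have hrA_le : ∀ b ∈ L, rA ≤ b := by
    intro b hb; rw [hcons] at hb; exact (pvFoldlMin_le (h :: t) h).2 b hb
  -- B's side
  have hBmem := pvMatchesB_mem arr k
  rw [repeated_k_times_alt]
  have hx0B : x0 ∈ pvScanRuns k (PySem.List.sorted arr (fun x => x) false) :=
    (hBmem x0).mpr ⟨hx0m, hx0c⟩
  obtain ⟨h', t', hcons'⟩ : ∃ h' t',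
      pvScanRuns k (PySem.List.sorted arr (fun x => x) false) = h' :: t' := by
    cases hc : pvScanRuns k (PySem.List.sorted arr (fun x => x) false) with
    | nil => rw [hc] at hx0B; simp at hx0B
    | cons a b => exact ⟨a, b, rfl⟩
  rw [hcons']
  -- B's result is the least element of its matches list
  have hBpair : (h' :: t').Pairwise (· ≤ ·) := by
    rw [← hcons']
    exact (PySem.List.sorted_pairwise arr (fun x => x)).sublist (pvScanRuns_sublist _ _)
  have hB_le : ∀ b ∈ (h' :: t'), h' ≤ b := by
    intro b hb
    rcases List.mem_cons.mp hb with rfl | hbt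
    · exact le_refl _
    · exact (List.pairwise_cons.mp hBpair).1 b hbt
  -- equality by mutual minimality
  have h1 : rA ≤ h' := by
    apply hrA_le
    apply (hLmem h').mpr
    exact (hBmem h').mp (hcons' ▸ List.mem_cons_self)
  have h2 : h' ≤ rA := by
    apply hB_le
    rw [← hcons']
    exact (hBmem rA).mpr ((hLmem rA).mp hrA_mem)
  exact le_antisymm h1 h2

-- ===== VERDICT (by name: the statement is the Claim_ definition above) =====
theorem repeated_k_times_spec : Claim_equal_repeated_k_times := by
  intro arr k _ hpre
  unfold Spec_repeated_k_times
  exact repeated_k_times_spec_aux arr k hpre
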